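-- pv_equiv track=rewrite | github.com/rhythmcao/text2sql-graph2tree | preprocess/wikisql/value_utils.py | resolve_conds_ambiguity
-- ===== SOURCE A (Python) =====
-- from itertools import permutations
--
-- def resolve_conds_ambiguity(conds: list, question: str, column_names: list):
--     cols = [column_names[col_id] for col_id, _, _ in conds]
--     for col in cols:
--         if col not in question: return conds
--     for order in permutations(range(len(cols))):
--         sorted_conds, qid = [], 0
--         for cond_id in order:
--             col = cols[cond_id]
--             if col in question[qid:]:
--                 qid = question.index(col, qid) + len(col)
--                 sorted_conds.append(conds[cond_id])
--             else:
--                 qid, sorted_conds = 0, []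
--                 break
--         else: return sorted_conds
--     return conds
-- ===== SOURCE B (Python) =====
-- def resolve_conds_ambiguity(conds: list, question: str, column_names: list):
--     cols = [column_names[col_id] for col_id, _, _ in conds]
--     if any(col not in question for col in cols):
--         return conds
--     n = len(conds)
--     used = [False] * n
--
--     def extend(pos):
--         # return the lexicographically-first order of the still-unused condition
--         # indices whose columns can be matched greedily left-to-right from pos,
--         # or None if no such order exists
--         if all(used):
--             return []
--         for i in range(n):
--             if not used[i]:
--                 p = question.find(cols[i], pos)
--                 if p != -1:
--                     used[i] = True
--                     tail = extend(p + len(cols[i]))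
--                     if tail is not None:
--                         return [i] + tail
--                     used[i] = False
--         return None
--
--     order = extend(0)
--     return conds if order is None else [conds[i] for i in order]
-- ===== Notes on version B (the rewrite author's own statement) =====
-- stated objective: alternative
-- what changed: Replaces the scan over all n! candidate permutations (itertools.permutations, re-running each order from scratch) by a recursive backtracking search over a mutable used-flag array that returns an index order and shares/prunes already-failed prefixes, mapping the order back to conditions at the end.
import Mathlib
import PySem

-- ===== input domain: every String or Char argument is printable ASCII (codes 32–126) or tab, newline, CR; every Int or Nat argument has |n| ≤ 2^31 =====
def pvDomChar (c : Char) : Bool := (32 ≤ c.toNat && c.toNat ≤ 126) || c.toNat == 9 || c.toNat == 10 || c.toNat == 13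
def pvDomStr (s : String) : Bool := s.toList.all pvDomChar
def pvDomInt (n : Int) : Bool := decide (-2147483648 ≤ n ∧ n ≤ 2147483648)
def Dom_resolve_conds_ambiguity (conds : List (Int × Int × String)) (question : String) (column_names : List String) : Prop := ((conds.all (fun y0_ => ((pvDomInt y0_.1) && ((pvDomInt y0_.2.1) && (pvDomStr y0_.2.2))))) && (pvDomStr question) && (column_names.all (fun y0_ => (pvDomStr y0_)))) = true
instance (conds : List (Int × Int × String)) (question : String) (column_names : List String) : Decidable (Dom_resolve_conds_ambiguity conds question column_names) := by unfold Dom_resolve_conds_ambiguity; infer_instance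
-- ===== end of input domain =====

-- B replaces A's scan over all n! candidate permutations by a recursive backtracking
-- search over a used-flag array that returns an index order (mapped back to conditions
-- at the end) and prunes every order sharing an already-failed prefix; objective:
-- alternative algorithm of the same worst-case cost.

-- ===== PORT A =====
-- A's inner loop over one candidate order: consume the columns left to right,
-- advancing qid past each match; none = the 'break' (order rejected).
-- question[qid:] with qid : Nat is q.drop qid; question.index(col, qid) is findFrom.
def pvRunA (cols : List (List Char)) (conds : List (Int × Int × String)) (q : List Char) :
    List Nat → Nat → List (Int × Int × String) → Option (List (Int × Int × String))
  | [], _, acc => some acc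
  | i :: rest, qid, acc =>
    let col := cols.getD i []
    if PySem.Chars.isIn col (q.drop qid) then
      pvRunA cols conds q rest ((PySem.Chars.findFrom q col (qid : Int) none).toNat + col.length)
        (acc ++ [conds.getD i (0, 0, "")])
    else none

def resolve_conds_ambiguity (conds : List (Int × Int × String)) (question : String) (column_names : List String) : List (Int × Int × String) :=
  let cols := conds.map (fun c => (PySem.List.pyGetD column_names c.1 "").toList)
  if cols.all (fun col => PySem.Chars.isIn col question.toList) then
    match (PySem.List.permutations (List.range cols.length) cols.length).findSome?
        (fun ord => pvRunA cols conds question.toList ord 0 []) with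
    | some r => r
    | none => conds
  else conds

-- ===== PORT B =====
-- B's helper `extend`: `used` is the mutable flag array; pvTry is the `for i in
-- range(n)` loop starting at index i (question.find(col, pos) is findFrom, -1 absent);
-- pvExtend is one call of extend(pos). A successful step marks i used and recurses;
-- failure falls through to the next i (the backtracking 'used[i] = False' reset).
-- (termination helper for the port, cited in decreasing_by)
theorem pvCountSetLt (l : List Bool) (i : Nat) (h : i < l.length) (hf : l[i] = false) :
    (l.set i true).count false < l.count false := by
  induction l generalizing i with
  | nil => simp at h
  | cons b t ih =>
    cases i with
    | zero => simp_all
    | succ j =>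
      simp only [List.set_cons_succ, List.count_cons]
      have := ih j (by simpa using h) (by simpa using hf)
      omega

mutual
def pvTry (cols : List (List Char)) (q : List Char) (used : List Bool) (pos : Nat) (i : Nat) : Option (List Nat) :=
  if h : i < used.length then
    if used[i] then pvTry cols q used pos (i + 1)
    else
      let col := cols.getD i []
      let p := PySem.Chars.findFrom q col (pos : Int) none
      if hp : p = -1 then pvTry cols q used pos (i + 1)
      else
        match pvExtend cols q (used.set i true) (p.toNat + col.length) with
        | some tail => some (i :: tail)
        | none => pvTry cols q used pos (i + 1)
  else none
termination_by (used.count false, used.length + 1 - i)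
decreasing_by
  · exact Prod.Lex.right _ (by omega)
  · exact Prod.Lex.right _ (by omega)
  · exact Prod.Lex.left _ _ (pvCountSetLt used i h (by simp_all))
  · exact Prod.Lex.right _ (by omega)

def pvExtend (cols : List (List Char)) (q : List Char) (used : List Bool) (pos : Nat) : Option (List Nat) :=
  if used.all (fun b => b) then some [] else pvTry cols q used pos 0
termination_by (used.count false, used.length + 2)
decreasing_by
  · exact Prod.Lex.right _ (by omega)
end

def resolve_conds_ambiguity_alt (conds : List (Int × Int × String)) (question : String) (column_names : List String) : List (Int × Int × String) :=
  let cols := conds.map (fun c => (PySem.List.pyGetD column_names c.1 "").toList)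
  if cols.any (fun col => !PySem.Chars.isIn col question.toList) then conds
  else
    match pvExtend cols question.toList (List.replicate conds.length false) 0 with
    | some ord => ord.map (fun i => conds.getD i (0, 0, ""))
    | none => conds

-- ===== PRECONDITION & SPEC =====
-- A raises IndexError when some condition's column id is out of range of
-- column_names (Python-style, negative ids count from the end); Pre_ excludes
-- exactly those inputs.
def Pre_resolve_conds_ambiguity (conds : List (Int × Int × String)) (question : String) (column_names : List String) : Prop :=
  ∀ c ∈ conds, PySem.Raise.InRange column_names.length c.1
instance (conds : List (Int × Int × String)) (question : String) (column_names : List String) : Decidable (Pre_resolve_conds_ambiguity conds question column_names) := by unfold Pre_resolve_conds_ambiguity; infer_instance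

def pvWitness_resolve_conds_ambiguity : (List (Int × Int × String)) × String × List String :=
  ([(0, 2, "x"), (1, 0, "y")], "b then a", ["a", "b"])

def Spec_resolve_conds_ambiguity (conds : List (Int × Int × String)) (question : String) (column_names : List String) (out : List (Int × Int × String)) : Prop := out = resolve_conds_ambiguity_alt conds question column_names
instance (conds : List (Int × Int × String)) (question : String) (column_names : List String) (out : List (Int × Int × String)) : Decidable (Spec_resolve_conds_ambiguity conds question column_names out) := by unfold Spec_resolve_conds_ambiguity; infer_instance

-- ===== CLAIM (what is proved, stated in full; the proofs are below) =====
def Claim_equal_resolve_conds_ambiguity : Prop := ∀ (conds : List (Int × Int × String)) (question : String) (column_names : List String), Dom_resolve_conds_ambiguity conds question column_names → Pre_resolve_conds_ambiguity conds question column_names → Spec_resolve_conds_ambiguity conds question column_names (resolve_conds_ambiguity conds question column_names)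

-- ===== LEMMAS AND PROOFS =====

-- proof-side bridge program: backtracking over the explicit list `rem` of unused
-- indices, accumulating conditions directly (the midpoint between the two ports)
def pvSearchB (cols : List (List Char)) (conds : List (Int × Int × String)) (q : List Char)
    (rem : List Nat) (qid : Nat) (acc : List (Int × Int × String)) : Option (List (Int × Int × String)) :=
  if rem = [] then some acc
  else rem.attach.findSome? (fun x =>
    let col := cols.getD x.1 []
    if PySem.Chars.isIn col (q.drop qid) then
      pvSearchB cols conds q (rem.erase x.1)
        ((PySem.Chars.findFrom q col (qid : Int) none).toNat + col.length)
        (acc ++ [conds.getD x.1 (0, 0, "")])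
    else none)
termination_by rem.length
decreasing_by
  have hx := x.2
  have : rem.length ≠ 0 := by simpa [List.length_eq_zero_iff] using ‹¬ rem = []›
  rw [List.length_erase_of_mem hx]; omega

-- pointwise-equal functions give equal findSome? (general; not found in the library)
theorem pvFindSome?_congr {α β : Type} {f g : α → Option β} :
    ∀ (l : List α), (∀ x ∈ l, f x = g x) → l.findSome? f = l.findSome? g
  | [], _ => rfl
  | a :: l, h => by
    simp only [List.findSome?_cons, h a (List.mem_cons_self)]
    cases g a with
    | some b => rfl
    | none => exact pvFindSome?_congr l (fun x hx => h x (List.mem_cons_of_mem a hx))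

-- findSome? distributes over flatMap (not in the library under this name)
theorem pvFindSome?_flatMap {α β γ : Type} (f : β → Option γ) (g : α → List β) :
    ∀ (l : List α), (l.flatMap g).findSome? f = l.findSome? (fun a => (g a).findSome? f)
  | [] => rfl
  | a :: l => by
    simp only [List.flatMap_cons, List.findSome?_append, List.findSome?_cons]
    cases h : (g a).findSome? f with
    | none => simpa using pvFindSome?_flatMap f g l
    | some b => simp

-- turning the index-driven outer layer of `permutations` into an element-driven scan
theorem pvIndexed_to_elem {β : Type} (G : Nat → List Nat → Option β) :
    ∀ (rem : List Nat), rem.Nodup →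
    ((List.range rem.length).findSome? (fun j =>
        match rem[j]? with
        | none => none
        | some x => G x (rem.eraseIdx j)))
      = rem.findSome? (fun x => G x (rem.erase x))
  | [], _ => rfl
  | a :: rem, h => by
    have hnd := (List.nodup_cons.mp h).2
    have hna := (List.nodup_cons.mp h).1
    simp only [List.length_cons, List.range_succ_eq_map, List.findSome?_cons,
      List.findSome?_map]
    have hG : ∀ x ∈ rem, G x ((a :: rem).erase x) = G x (a :: rem.erase x) := by
      intro x hx
      have : (a :: rem).erase x = a :: rem.erase x := by
        rw [List.erase_cons_tail]
        simp only [beq_iff_eq]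
        exact fun hax => hna (hax ▸ hx)
      rw [this]
    simp only [List.getElem?_cons_zero, List.eraseIdx_cons_zero, List.erase_cons_head]
    cases G a rem with
    | some b => simp
    | none =>
      have := pvIndexed_to_elem (fun x l => G x (a :: l)) rem hnd
      simp only [Function.comp_def, List.getElem?_cons_succ, List.eraseIdx_cons_succ,
        Nat.succ_eq_add_one] at *
      rw [this]
      exact pvFindSome?_congr rem (fun x hx => (hG x hx).symm)

-- findSome? over an attached list only looks at the values (general fact)
theorem pvFindSome?_attach {α β : Type} (l : List α) (f : α → Option β) :
    l.attach.findSome? (fun x => f x.1) = l.findSome? f := by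
  conv_rhs => rw [← List.attach_map_subtype_val l]
  rw [List.findSome?_map]
  rfl

-- one step of A's loop on a singleton prefix, then the rest
theorem pvRunA_cons (cols : List (List Char)) (conds : List (Int × Int × String)) (q : List Char)
    (i : Nat) (rest : List Nat) (qid : Nat) (acc : List (Int × Int × String)) :
    pvRunA cols conds q (i :: rest) qid acc =
      (if PySem.Chars.isIn (cols.getD i []) (q.drop qid) then
        pvRunA cols conds q rest
          ((PySem.Chars.findFrom q (cols.getD i []) (qid : Int) none).toNat + (cols.getD i []).length)
          (acc ++ [conds.getD i (0, 0, "")])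
      else none) := by
  rw [pvRunA]

-- FIRST BRIDGE: first success of A's loop over the lexicographic permutation list of
-- `rem` equals the list-based backtracking search over `rem`.
theorem pvMain (cols : List (List Char)) (conds : List (Int × Int × String)) (q : List Char) :
    ∀ (n : Nat) (rem : List Nat), rem.length = n → rem.Nodup → ∀ (qid : Nat) (acc : List (Int × Int × String)),
    (PySem.List.permutations rem n).findSome? (fun ord => pvRunA cols conds q ord qid acc)
      = pvSearchB cols conds q rem qid acc := by
  intro n
  induction n with
  | zero =>
    intro rem hl _ qid acc
    rw [List.length_eq_zero_iff.mp hl]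
    rw [pvSearchB]
    simp [PySem.List.permutations, pvRunA]
  | succ n ih =>
    intro rem hl hnd qid acc
    have hne : rem ≠ [] := by intro h; rw [h] at hl; simp at hl
    rw [pvSearchB]; simp only [hne, if_false]
    rw [show PySem.List.permutations rem (n + 1)
        = (List.range rem.length).flatMap (fun i =>
            match rem[i]? with
            | none => []
            | some x => (PySem.List.permutations (rem.eraseIdx i) n).map (fun p => x :: p))
      from by
        rw [PySem.List.permutations]; congr 1; funext i; cases rem[i]? <;> rfl]
    rw [pvFindSome?_flatMap]
    rw [pvFindSome?_congr (List.range rem.length)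
      (g := fun j =>
        match rem[j]? with
        | none => none
        | some x =>
          ((PySem.List.permutations (rem.eraseIdx j) n).map (fun p => x :: p)).findSome?
            (fun ord => pvRunA cols conds q ord qid acc))
      (fun j _ => by cases h : rem[j]? <;> simp [h])]
    rw [pvIndexed_to_elem (fun x l =>
      ((PySem.List.permutations l n).map (fun p => x :: p)).findSome?
        (fun ord => pvRunA cols conds q ord qid acc)) rem hnd]
    rw [pvFindSome?_attach rem (fun i =>
      if PySem.Chars.isIn (cols.getD i []) (q.drop qid) then
        pvSearchB cols conds q (rem.erase i)
          ((PySem.Chars.findFrom q (cols.getD i []) (qid : Int) none).toNat + (cols.getD i []).length)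
          (acc ++ [conds.getD i (0, 0, "")])
      else none)]
    apply pvFindSome?_congr
    intro x hx
    rw [List.findSome?_map]
    simp only [Function.comp_def, pvRunA_cons]
    by_cases hc : PySem.Chars.isIn (cols.getD x []) (q.drop qid)
    · simp only [hc, if_true]
      exact ih (rem.erase x) (by rw [List.length_erase_of_mem hx, hl]; omega) (hnd.erase x) _ _
    · simp only [List.getD] at hc
      simp [hc]

-- the increasing list of still-unused indices from position i on
def pvUnused (used : List Bool) (i : Nat) : List Nat :=
  if h : i < used.length then
    (if used[i] then [] else [i]) ++ pvUnused used (i + 1)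
  else []
termination_by used.length - i

theorem pvUnused_mem (used : List Bool) (i : Nat) :
    ∀ j ∈ pvUnused used i, i ≤ j ∧ ∃ h : j < used.length, used[j] = false := by
  intro j hj
  rw [pvUnused] at hj
  by_cases h : i < used.length
  · rw [dif_pos h] at hj
    rcases List.mem_append.mp hj with h1 | h1
    · by_cases hui : used[i] = true
      · simp [hui] at h1
      · rw [if_neg hui] at h1
        simp only [List.mem_singleton] at h1
        subst h1
        exact ⟨le_refl _, h, by simpa using hui⟩
    · have := pvUnused_mem used (i + 1) j h1
      exact ⟨by omega, this.2⟩
  · rw [dif_neg h] at hj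
    simp at hj
termination_by used.length - i
decreasing_by omega

theorem pvUnused_nil_iff (used : List Bool) (i : Nat) :
    pvUnused used i = [] ↔ ∀ j, i ≤ j → ∀ (hj : j < used.length), used[j] = true := by
  rw [pvUnused]
  by_cases h : i < used.length
  · rw [dif_pos h]
    by_cases hui : used[i] = true
    · rw [if_pos hui, List.nil_append, pvUnused_nil_iff used (i + 1)]
      constructor
      · intro ha j hij hj
        rcases Nat.eq_or_lt_of_le hij with rfl | hlt
        · exact hui
        · exact ha j hlt hj
      · intro ha j hij hj
        exact ha j (by omega) hj
    · rw [if_neg hui]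
      constructor
      · intro hc; simp at hc
      · intro ha; exact absurd (ha i (le_refl _) h) hui
  · rw [dif_neg h]
    constructor
    · intro _ j hij hj; omega
    · intro _; rfl
termination_by used.length - i
decreasing_by omega

theorem pvUnused_set_gt (used : List Bool) (x : Nat) (i : Nat) (hxi : x < i) :
    pvUnused (used.set x true) i = pvUnused used i := by
  conv_lhs => rw [pvUnused]
  conv_rhs => rw [pvUnused]
  by_cases h : i < used.length
  · have h' : i < (used.set x true).length := by simpa using h
    rw [dif_pos h', dif_pos h, List.getElem_set_ne (by omega)]
    rw [pvUnused_set_gt used x (i + 1) (by omega)]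
  · rw [dif_neg (by simpa using h), dif_neg h]
termination_by used.length - i
decreasing_by omega

theorem pvUnused_set (used : List Bool) (x : Nat) (hx : x < used.length) (hxf : used[x] = false)
    (i : Nat) : pvUnused (used.set x true) i = (pvUnused used i).erase x := by
  conv_lhs => rw [pvUnused]
  conv_rhs => rw [pvUnused]
  by_cases h : i < used.length
  · have h' : i < (used.set x true).length := by simpa using h
    rw [dif_pos h', dif_pos h]
    rcases eq_or_ne i x with rfl | hne
    · rw [List.getElem_set_self (by simpa using hx), if_pos rfl, if_neg (by simp [hxf]), List.nil_append,
        List.singleton_append, List.erase_cons_head]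
      exact pvUnused_set_gt used i (i + 1) (by omega)
    · rw [List.getElem_set_ne (by omega)]
      by_cases hui : used[i] = true
      · rw [if_pos hui]
        simp only [List.nil_append]
        exact pvUnused_set used x hx hxf (i + 1)
      · rw [if_neg hui]
        simp only [List.singleton_append]
        rw [List.erase_cons_tail (by simpa using hne)]
        rw [pvUnused_set used x hx hxf (i + 1)]
  · rw [dif_neg (by simpa using h), dif_neg h]
    simp
termination_by used.length - i
decreasing_by all_goals omega

theorem pvUnused_replicate (n : Nat) (i : Nat) :
    pvUnused (List.replicate n false) i = List.range' i (n - i) := by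
  rw [pvUnused]
  by_cases h : i < n
  · rw [dif_pos (by simpa using h), List.getElem_replicate, if_neg (by simp),
      List.singleton_append, pvUnused_replicate n (i + 1)]
    have hni : n - i = (n - (i + 1)) + 1 := by omega
    rw [hni, List.range'_succ]
  · rw [dif_neg (by simpa using h)]
    have : n - i = 0 := by omega
    rw [this, List.range'_zero]
termination_by n - i
decreasing_by omega

-- the guard equivalence:  col in question[pos:]  ⇔  question.find(col, pos) ≠ -1
theorem pvGuard (q col : List Char) (pos : Nat) (hpos : pos ≤ q.length) :
    PySem.Chars.isIn col (q.drop pos) = true ↔ PySem.Chars.findFrom q col (pos : Int) none ≠ -1 := by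
  rw [PySem.Chars.isIn_iff_infix, Ne, PySem.Chars.findFrom_natCast_eq_neg_one_iff q col pos hpos]
  tauto

-- a successful find leaves the scan position within the question
theorem pvStep (q col : List Char) (pos : Nat) (hpos : pos ≤ q.length)
    (h : PySem.Chars.findFrom q col (pos : Int) none ≠ -1) :
    (PySem.Chars.findFrom q col (pos : Int) none).toNat + col.length ≤ q.length := by
  rw [PySem.Chars.findFrom_natCast q col pos hpos] at h ⊢
  by_cases hf : PySem.Chars.find (q.drop pos) col = -1
  · simp [hf] at h
  · rw [if_neg hf] at ⊢
    have h0 : 0 ≤ PySem.Chars.find (q.drop pos) col := by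
      rcases PySem.Chars.neg_one_le_find (q.drop pos) col |>.lt_or_eq with hlt | heq
      · omega
      · exact absurd heq.symm hf
    have hle : PySem.Chars.find (q.drop pos) col ≤ (q.drop pos).length :=
      PySem.Chars.find_le_length (q.drop pos) col
    have hpre := PySem.Chars.find_spec h0
    have hlen := hpre.1.length_le
    simp only [List.length_drop] at hlen hle
    have ht : ((pos : Int) + PySem.Chars.find (q.drop pos) col).toNat
        = pos + (PySem.Chars.find (q.drop pos) col).toNat := by omega
    rw [ht]
    omega

-- dite-free unfolding of one step of pvTry
theorem pvTry_eq (cols : List (List Char)) (q : List Char) (used : List Bool) (pos i : Nat) :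
    pvTry cols q used pos i =
      if h : i < used.length then
        if used[i] then pvTry cols q used pos (i + 1)
        else if PySem.Chars.findFrom q (cols.getD i []) (pos : Int) none = -1 then
          pvTry cols q used pos (i + 1)
        else
          match pvExtend cols q (used.set i true)
              ((PySem.Chars.findFrom q (cols.getD i []) (pos : Int) none).toNat + (cols.getD i []).length) with
          | some tail => some (i :: tail)
          | none => pvTry cols q used pos (i + 1)
      else none := by
  rw [pvTry]
  rfl

theorem pvUnused_eq (used : List Bool) (i : Nat) :
    pvUnused used i
      = if h : i < used.length then (if used[i] then [] else [i]) ++ pvUnused used (i + 1) else [] := by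
  rw [pvUnused]

-- SECOND BRIDGE: the list-based search over the unused indices of `used` equals B's
-- flag-array backtracking with the accumulated conditions recovered by mapping.
theorem pvBridge (cols : List (List Char)) (conds : List (Int × Int × String)) (q : List Char) :
    ∀ (c : Nat) (used : List Bool), used.count false = c → ∀ (pos : Nat), pos ≤ q.length →
    ∀ (acc : List (Int × Int × String)),
    pvSearchB cols conds q (pvUnused used 0) pos acc
      = (pvExtend cols q used pos).map (fun ord => acc ++ ord.map (fun i => conds.getD i (0, 0, ""))) := by
  intro c
  induction c using Nat.strong_induction_on with
  | _ c ihc => ?_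
  intro used hc pos hpos acc
  rw [pvExtend]
  by_cases hall : used.all (fun b => b) = true
  · rw [if_pos hall]
    have hnil : pvUnused used 0 = [] := by
      rw [pvUnused_nil_iff]
      intro j _ hj
      simpa using List.all_eq_true.mp hall used[j] (used.getElem_mem hj)
    rw [hnil, pvSearchB]
    simp
  · rw [if_neg hall]
    have hne : pvUnused used 0 ≠ [] := by
      intro hnil
      apply hall
      rw [List.all_eq_true]
      intro b hb
      obtain ⟨j, hj, rfl⟩ := List.mem_iff_getElem.mp hb
      exact (pvUnused_nil_iff used 0).mp hnil j (by omega) hj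
    rw [pvSearchB, if_neg hne]
    rw [pvFindSome?_attach (pvUnused used 0) (fun x =>
      if PySem.Chars.isIn (cols.getD x []) (q.drop pos) then
        pvSearchB cols conds q ((pvUnused used 0).erase x)
          ((PySem.Chars.findFrom q (cols.getD x []) (pos : Int) none).toNat + (cols.getD x []).length)
          (acc ++ [conds.getD x (0, 0, "")])
      else none)]
    have inner : ∀ (k i : Nat), used.length - i ≤ k →
        (pvUnused used i).findSome? (fun x =>
          if PySem.Chars.isIn (cols.getD x []) (q.drop pos) then
            pvSearchB cols conds q ((pvUnused used 0).erase x)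
              ((PySem.Chars.findFrom q (cols.getD x []) (pos : Int) none).toNat + (cols.getD x []).length)
              (acc ++ [conds.getD x (0, 0, "")])
          else none)
          = (pvTry cols q used pos i).map (fun ord => acc ++ ord.map (fun i => conds.getD i (0, 0, ""))) := by
      intro k
      induction k with
      | zero =>
        intro i hk
        have h : ¬ i < used.length := by omega
        rw [pvUnused_eq used i, dif_neg h, pvTry_eq, dif_neg h]
        rfl
      | succ k ihk =>
        intro i hk
        by_cases h : i < used.length
        · rw [pvUnused_eq used i, dif_pos h, pvTry_eq, dif_pos h]
          by_cases hui : used[i] = true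
          · rw [if_pos hui, if_pos hui, List.nil_append]
            exact ihk (i + 1) (by omega)
          · rw [if_neg hui, if_neg hui, List.singleton_append, List.findSome?_cons]
            by_cases hp : PySem.Chars.findFrom q (cols.getD i []) (pos : Int) none = -1
            · have hg : PySem.Chars.isIn (cols.getD i []) (q.drop pos) ≠ true := by
                intro hin
                exact (pvGuard q (cols.getD i []) pos hpos).mp hin hp
              rw [if_neg hg, if_pos hp]
              exact ihk (i + 1) (by omega)
            · have hg : PySem.Chars.isIn (cols.getD i []) (q.drop pos) = true :=
                (pvGuard q (cols.getD i []) pos hpos).mpr hp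
              rw [if_pos hg, if_neg hp]
              have hif : used[i] = false := by simpa using hui
              rw [← pvUnused_set used i h hif 0]
              have hrec := ihc ((used.set i true).count false)
                (hc ▸ pvCountSetLt used i h hif) (used.set i true) rfl
                ((PySem.Chars.findFrom q (cols.getD i []) (pos : Int) none).toNat + (cols.getD i []).length)
                (pvStep q (cols.getD i []) pos hpos hp)
                (acc ++ [conds.getD i (0, 0, "")])
              rw [hrec]
              cases hE : pvExtend cols q (used.set i true)
                  ((PySem.Chars.findFrom q (cols.getD i []) (pos : Int) none).toNat + (cols.getD i []).length) with
              | some tail => simp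
              | none =>
                simp only [Option.map_none]
                exact ihk (i + 1) (by omega)
        · rw [pvUnused_eq used i, dif_neg h, pvTry_eq, dif_neg h]
          rfl
    exact inner used.length 0 (by omega)

-- ===== VERDICT (by name: the statement is the Claim_ definition above) =====
theorem resolve_conds_ambiguity_spec : Claim_equal_resolve_conds_ambiguity := by
  intro conds question column_names _ _
  unfold Spec_resolve_conds_ambiguity resolve_conds_ambiguity resolve_conds_ambiguity_alt
  simp only [List.length_map]
  set cs := conds.map (fun c => (PySem.List.pyGetD column_names c.1 "").toList) with hcs
  by_cases hall : cs.all (fun col => PySem.Chars.isIn col question.toList) = true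
  · have hany : ¬ (cs.any (fun col => !PySem.Chars.isIn col question.toList) = true) := by
      rw [List.any_eq_true]
      rintro ⟨x, hx, hpx⟩
      have := List.all_eq_true.mp hall x hx
      simp only [this] at hpx
      simp at hpx
    rw [if_pos hall, if_neg hany]
    rw [pvMain cs conds question.toList conds.length (List.range conds.length)
      List.length_range List.nodup_range]
    rw [show (List.range conds.length) = pvUnused (List.replicate conds.length false) 0 from by
      rw [pvUnused_replicate conds.length 0, Nat.sub_zero, List.range_eq_range']]
    rw [pvBridge cs conds question.toList ((List.replicate conds.length false).count false)
      (List.replicate conds.length false) rfl 0 (by omega) []]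
    cases hE : pvExtend cs question.toList (List.replicate conds.length false) 0 <;> simp
  · have hany : cs.any (fun col => !PySem.Chars.isIn col question.toList) = true := by
      rw [List.any_eq_true]
      rw [List.all_eq_true] at hall
      push Not at hall
      obtain ⟨x, hx, hpx⟩ := hall
      exact ⟨x, hx, by simp [hpx]⟩
    rw [if_neg hall, if_pos hany]
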